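-- pv_equiv track=rewrite | github.com/BitanBanerjee22/2D-Arrays-Sparse-Matrix-Polynomial | Sum of diagonals.py | sum_diagonals
-- ===== SOURCE A (Python) =====
-- def sum_diagonals(mat):
--     n = len(mat)
--     s = 0
--     for i in range(n):
--         s += mat[i][i]
--         if i != n-1-i:
--             s += mat[i][n-1-i]
--     return s
-- ===== SOURCE B (Python) =====
-- def sum_diagonals(mat):
--     lo, hi = 0, len(mat) - 1
--     s = 0
--     while lo < hi:
--         s += mat[lo][lo] + mat[lo][hi] + mat[hi][hi] + mat[hi][lo]
--         lo += 1
--         hi -= 1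
--     if lo == hi:
--         s += mat[lo][lo]
--     return s
-- ===== Notes on version B (the rewrite author's own statement) =====
-- stated objective: alternative
-- what changed: Replaces A's full left-to-right scan with a conditional anti-diagonal add per row by a two-pointer sweep from both ends that consumes a row pair (four elements) per step in half the iterations, with a final center element for odd n.
import Mathlib
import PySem

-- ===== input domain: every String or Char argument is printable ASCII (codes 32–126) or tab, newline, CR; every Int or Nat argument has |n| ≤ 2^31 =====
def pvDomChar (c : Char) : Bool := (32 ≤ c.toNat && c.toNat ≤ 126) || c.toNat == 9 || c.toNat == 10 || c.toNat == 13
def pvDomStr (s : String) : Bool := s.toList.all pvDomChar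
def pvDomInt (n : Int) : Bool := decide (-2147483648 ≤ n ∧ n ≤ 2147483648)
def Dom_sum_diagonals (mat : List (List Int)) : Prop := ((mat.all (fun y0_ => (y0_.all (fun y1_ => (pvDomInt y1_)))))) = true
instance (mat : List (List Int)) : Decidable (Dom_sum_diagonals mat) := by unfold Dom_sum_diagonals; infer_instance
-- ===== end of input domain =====

-- B replaces A's full top-to-bottom scan (conditional anti-diagonal add per row) by a
-- two-pointer sweep from both ends, four elements per step, center element last (alternative traversal).

-- ===== PORT A =====
-- one pass i = 0..n-1: add mat[i][i], and mat[i][n-1-i] only when the two positions differ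
def sum_diagonals (mat : List (List Int)) : Int :=
  let n := mat.length
  (List.range n).foldl
    (fun s i =>
      let s := s + ((mat.getD i []).getD i 0)
      if i ≠ n - 1 - i then s + ((mat.getD i []).getD (n - 1 - i) 0) else s)
    0

-- ===== PORT B =====
-- the while loop of Source B: pointers lo, hi move inward from both ends, four adds per step
def pvTwoPtr (mat : List (List Int)) (lo hi : Int) (s : Int) : Int :=
  if lo < hi then
    pvTwoPtr mat (lo + 1) (hi - 1)
      (s + ((mat.getD lo.toNat []).getD lo.toNat 0)
         + ((mat.getD lo.toNat []).getD hi.toNat 0)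
         + ((mat.getD hi.toNat []).getD hi.toNat 0)
         + ((mat.getD hi.toNat []).getD lo.toNat 0))
  else if lo = hi then s + ((mat.getD lo.toNat []).getD lo.toNat 0)
  else s
termination_by (hi - lo).toNat
decreasing_by omega

def sum_diagonals_alt (mat : List (List Int)) : Int :=
  pvTwoPtr mat 0 ((mat.length : Int) - 1) 0

-- ===== PRECONDITION & SPEC =====
-- Pre_ excludes exactly the ragged matrices on which A's indexing mat[i][i] or mat[i][n-1-i] raises IndexError.
def Pre_sum_diagonals (mat : List (List Int)) : Prop :=
  ∀ i ∈ List.range mat.length,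
    i < (mat.getD i []).length ∧ mat.length - 1 - i < (mat.getD i []).length
instance (mat : List (List Int)) : Decidable (Pre_sum_diagonals mat) := by
  unfold Pre_sum_diagonals; infer_instance
def pvWitness_sum_diagonals : List (List Int) := [[1, 2, 3], [4, 5, 6], [7, 8, 9]]
def Spec_sum_diagonals (mat : List (List Int)) (out : Int) : Prop := out = sum_diagonals_alt mat
instance (mat : List (List Int)) (out : Int) : Decidable (Spec_sum_diagonals mat out) := by
  unfold Spec_sum_diagonals; infer_instance

-- ===== CLAIM (what is proved, stated in full; the proofs are below) =====
def Claim_equal_sum_diagonals : Prop := ∀ (mat : List (List Int)), Dom_sum_diagonals mat → Pre_sum_diagonals mat → Spec_sum_diagonals mat (sum_diagonals mat)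

-- ===== LEMMAS AND PROOFS =====

-- the per-index contribution of A's loop
def pvF (mat : List (List Int)) (i : Nat) : Int :=
  ((mat.getD i []).getD i 0) +
    (if i ≠ mat.length - 1 - i then ((mat.getD i []).getD (mat.length - 1 - i) 0) else 0)

theorem pv_foldl_sum (g : Nat → Int) (m : Nat) (c : Int) :
    (List.range m).foldl (fun s i => s + g i) c = c + ((List.range m).map g).sum := by
  induction m generalizing c with
  | zero => simp
  | succ k ih => simp [List.range_succ, ih]; ring

theorem pv_map_range_sum (h : Nat → Int) (n : Nat) :
    ((List.range n).map h).sum = ∑ i ∈ Finset.range n, h i := by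
  induction n with
  | zero => simp
  | succ k ih => simp [List.range_succ, Finset.sum_range_succ, ih]

-- A equals the sum of pvF over range n
theorem pv_A_eq_sum (mat : List (List Int)) :
    sum_diagonals mat = ∑ i ∈ Finset.range mat.length, pvF mat i := by
  unfold sum_diagonals
  set n := mat.length with hn
  have hbody : ∀ (s : Int) (i : Nat),
      (let s' := s + ((mat.getD i []).getD i 0);
        if i ≠ n - 1 - i then s' + ((mat.getD i []).getD (n - 1 - i) 0) else s')
        = s + pvF mat i := by
    intro s i
    by_cases h : i ≠ n - 1 - i <;> simp [pvF, ← hn, h] <;> ring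
  calc (List.range n).foldl
        (fun s i =>
          let s := s + ((mat.getD i []).getD i 0)
          if i ≠ n - 1 - i then s + ((mat.getD i []).getD (n - 1 - i) 0) else s) 0
      = (List.range n).foldl (fun s i => s + pvF mat i) 0 :=
        PySem.List.foldl_congr_mem _ _ _ _ (fun s i _ => hbody s i)
    _ = ((List.range n).map (pvF mat)).sum := by rw [pv_foldl_sum]; ring
    _ = ∑ i ∈ Finset.range n, pvF mat i := pv_map_range_sum _ n

-- the two-pointer loop accumulates pvF over the closed interval [lo, hi]
theorem pv_loop_eq (mat : List (List Int)) (k : Nat) :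
    ∀ (lo hi : Nat) (s : Int), hi + 1 - lo ≤ k → lo + hi = mat.length - 1 →
      pvTwoPtr mat (↑lo) (↑hi) s = s + ∑ i ∈ Finset.Icc lo hi, pvF mat i := by
  induction k with
  | zero =>
      intro lo hi s hk hsum
      have hlt : hi < lo := by omega
      rw [pvTwoPtr]
      have h1 : ¬ ((lo : Int) < (hi : Int)) := by exact_mod_cast not_lt.mpr (Nat.le_of_lt hlt)
      have h2 : ¬ ((lo : Int) = (hi : Int)) := by exact_mod_cast fun h => absurd h (by omega)
      simp [h1, h2, Finset.Icc_eq_empty_of_lt hlt]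
  | succ k ih =>
      intro lo hi s hk hsum
      rcases lt_trichotomy lo hi with hlt | heq | hgt
      · rw [pvTwoPtr]
        have h1 : ((lo : Int) < (hi : Int)) := by exact_mod_cast hlt
        have hcast1 : ((lo : Int) + 1) = ((lo + 1 : Nat) : Int) := by push_cast; ring
        have hcast2 : ((hi : Int) - 1) = ((hi - 1 : Nat) : Int) := by
          have : 1 ≤ hi := by omega
          push_cast [this]; ring
        simp only [h1, if_pos, Int.toNat_natCast, hcast1, hcast2]
        rw [ih (lo + 1) (hi - 1) _ (by omega) (by omega)]
        have hsplit : Finset.Icc lo hi =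
            insert lo (insert hi (Finset.Icc (lo + 1) (hi - 1))) := by
          ext x; simp [Finset.mem_Icc]; omega
        have hlo_not : lo ∉ insert hi (Finset.Icc (lo + 1) (hi - 1)) := by
          simp [Finset.mem_Icc]; omega
        have hhi_not : hi ∉ Finset.Icc (lo + 1) (hi - 1) := by
          simp [Finset.mem_Icc]; omega
        rw [hsplit, Finset.sum_insert hlo_not, Finset.sum_insert hhi_not]
        have hFlo : pvF mat lo =
            ((mat.getD lo []).getD lo 0) + ((mat.getD lo []).getD hi 0) := by
          have e1 : mat.length - 1 - lo = hi := by omega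
          simp [pvF, e1, hlt.ne]
        have hFhi : pvF mat hi =
            ((mat.getD hi []).getD hi 0) + ((mat.getD hi []).getD lo 0) := by
          have e1 : mat.length - 1 - hi = lo := by omega
          simp [pvF, e1, hlt.ne']
        rw [hFlo, hFhi]; ring
      · subst heq
        rw [pvTwoPtr]
        have hF : pvF mat lo = ((mat.getD lo []).getD lo 0) := by
          have e : lo = mat.length - 1 - lo := by omega
          simp [pvF, ← e]
        simp [hF]
      · rw [pvTwoPtr]
        have h1 : ¬ ((lo : Int) < (hi : Int)) := by exact_mod_cast not_lt.mpr (Nat.le_of_lt hgt)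
        have h2 : ¬ ((lo : Int) = (hi : Int)) := by exact_mod_cast fun h => absurd h (by omega)
        simp [h1, h2, Finset.Icc_eq_empty_of_lt hgt]

-- ===== VERDICT (by name: the statement is the Claim_ definition above) =====
theorem sum_diagonals_spec : Claim_equal_sum_diagonals := by
  intro mat _ _
  unfold Spec_sum_diagonals sum_diagonals_alt
  rw [pv_A_eq_sum]
  rcases Nat.eq_zero_or_pos mat.length with h0 | hpos
  · rw [h0]
    rw [pvTwoPtr]
    norm_num
  · have hcast : ((mat.length : Int) - 1) = ((mat.length - 1 : Nat) : Int) := by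
      push_cast [hpos]; ring
    rw [hcast]
    have := pv_loop_eq mat mat.length 0 (mat.length - 1) 0 (by omega) (by omega)
    rw [show ((0 : Nat) : Int) = (0 : Int) by norm_num] at this
    rw [this]
    have hr : Finset.range mat.length = Finset.Icc 0 (mat.length - 1) := by
      ext x; simp [Finset.mem_Icc]; omega
    rw [hr]; ring
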